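-- pv_equiv track=rewrite | github.com/SHANAVAZ900/CP-2 | 09-shortenlongruns-Python/shortenlongruns.py | shortenlongruns
-- ===== SOURCE A (Python) =====
-- def shortenlongruns(L, k):
--     duplicate = L.copy()
--     first, last, i = 0, 0, 0
--     while i < len(duplicate):
--         while last < len(duplicate) and duplicate[first] == duplicate[last]:
--             last += 1
--         if last - first > k:
--             index = (last - first) % k
--             duplicate = duplicate[: first + index] + duplicate[last:]
--             last = first+index
--         elif last - first == k:
--             duplicate = duplicate[: last - 1] + duplicate[last:]
--             last -= 1
--         first = last
--         i = last
--     return duplicate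
-- ===== SOURCE B (Python) =====
-- def shortenlongruns(L, k):
--     out = []
--     i, n = 0, len(L)
--     while i < n:
--         j = i + 1
--         while j < n and L[j] == L[i]:
--             j += 1
--         run = j - i
--         if run > k:
--             run %= k
--         elif run == k:
--             run -= 1
--         out += [L[i]] * run
--         i = j
--     return out
-- ===== Notes on version B (the rewrite author's own statement) =====
-- stated objective: alternative
-- what changed: A repeatedly rebuilds the whole list by slicing and rescans it in place; B makes one left-to-right pass over the unchanged input, measures each run once, and appends the kept copies (len%k, k-1 or len) to an output list (asymptotically better on run-heavy inputs, but not measurably faster on the random timing family).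
-- outside the precondition, e.g. on shortenlongruns([1, 1], -2): A returns [], B returns []; on shortenlongruns([1], 0): A raises ZeroDivisionError, B raises ZeroDivisionError; on shortenlongruns([1, 1, 1], -2): A raises IndexError, B returns []
import Mathlib
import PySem

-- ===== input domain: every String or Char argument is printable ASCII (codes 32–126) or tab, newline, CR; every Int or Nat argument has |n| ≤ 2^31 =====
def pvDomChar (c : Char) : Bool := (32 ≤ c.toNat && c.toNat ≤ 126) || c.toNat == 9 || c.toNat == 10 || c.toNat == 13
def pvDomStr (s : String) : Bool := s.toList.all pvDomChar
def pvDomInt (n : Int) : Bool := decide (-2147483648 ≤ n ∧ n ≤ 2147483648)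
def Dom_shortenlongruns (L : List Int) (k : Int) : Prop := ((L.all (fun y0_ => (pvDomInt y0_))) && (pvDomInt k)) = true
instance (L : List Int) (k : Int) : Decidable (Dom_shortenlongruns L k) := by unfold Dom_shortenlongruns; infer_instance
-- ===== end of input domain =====

-- B replaces A's repeated slice-and-rebuild of the list by a single pass over the
-- unchanged input that appends each shortened run to an output list (objective: alternative).

-- ===== PORT A =====
-- inner 'while last < len(duplicate) and duplicate[first] == duplicate[last]: last += 1'
-- (fuel only makes the loop total; with fuel = len(dup)+1 the loop never runs out of it
-- on inputs satisfying Pre_)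

def shortenlongrunsInner (fuel : Nat) (dup : List Int) (first last : Int) : Int :=
  match fuel with
  | 0 => last
  | f + 1 =>
    if last < PySem.List.len dup ∧ PySem.List.pyGetD dup first 0 = PySem.List.pyGetD dup last 0 then
      shortenlongrunsInner f dup first (last + 1)
    else last

-- outer 'while i < len(duplicate)' loop of A; state (duplicate, first, last, i); fuel-totalised
-- (each iteration decreases len(duplicate) - i by at least 1 when 1 ≤ k, so fuel len(L)+1 suffices)
def shortenlongrunsOuter (fuel : Nat) (dup : List Int) (k first last i : Int) : List Int :=
  match fuel with
  | 0 => dup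
  | f + 1 =>
    if i < PySem.List.len dup then
      let last' := shortenlongrunsInner (dup.length + 1) dup first last
      if last' - first > k then
        let index := PySem.Int.mod (last' - first) k
        let dup' := PySem.List.slice dup none (some (first + index)) ++ PySem.List.slice dup (some last') none
        shortenlongrunsOuter f dup' k (first + index) (first + index) (first + index)
      else if last' - first = k then
        let dup' := PySem.List.slice dup none (some (last' - 1)) ++ PySem.List.slice dup (some last') none
        shortenlongrunsOuter f dup' k (last' - 1) (last' - 1) (last' - 1)
      else
        shortenlongrunsOuter f dup k last' last' last'
    else dup

def shortenlongruns (L : List Int) (k : Int) : List Int :=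
  shortenlongrunsOuter (L.length + 1) L k 0 0 0

-- ===== PORT B =====
-- inner 'while j < n and L[j] == L[i]: j += 1' of Source B (structural recursion)
def shortenlongrunsScan (L : List Int) (i j : Nat) : Nat :=
  if h : j < L.length ∧ L.getD j 0 = L.getD i 0 then
    shortenlongrunsScan L i (j + 1)
  else j
termination_by L.length - j

theorem shortenlongrunsScan_le (L : List Int) (i j : Nat) : j ≤ shortenlongrunsScan L i j := by
  fun_induction shortenlongrunsScan L i j with
  | case1 j h ih => omega
  | case2 j h => omega

-- outer 'while i < n' loop of Source B, accumulating the output list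
def shortenlongrunsLoop (L : List Int) (k : Int) (out : List Int) (i : Nat) : List Int :=
  if h : i < L.length then
    let j := shortenlongrunsScan L i (i + 1)
    let run : Int := (j : Int) - (i : Int)
    let run' := if run > k then PySem.Int.mod run k else if run = k then run - 1 else run
    shortenlongrunsLoop L k (out ++ List.replicate run'.toNat (L.getD i 0)) j
  else out
termination_by L.length - i
decreasing_by
  have := shortenlongrunsScan_le L i (i + 1)
  omega


def shortenlongruns_alt (L : List Int) (k : Int) : List Int :=
  shortenlongrunsLoop L k [] 0

-- ===== PRECONDITION & SPEC =====
-- Pre_ excludes k ≤ 0 with a nonempty list: there A raises ZeroDivisionError (k = 0) or,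
-- for negative k, raises IndexError / loops forever on most inputs; a non-positive run
-- bound is outside the task's natural domain.
def Pre_shortenlongruns (L : List Int) (k : Int) : Prop := L = [] ∨ 1 ≤ k
instance (L : List Int) (k : Int) : Decidable (Pre_shortenlongruns L k) := by
  unfold Pre_shortenlongruns; infer_instance

def pvWitness_shortenlongruns : List Int × Int := ([1, 1, 1, 2, 2, 3], 2)

def Spec_shortenlongruns (L : List Int) (k : Int) (out : List Int) : Prop := out = shortenlongruns_alt L k
instance (L : List Int) (k : Int) (out : List Int) : Decidable (Spec_shortenlongruns L k out) := by
  unfold Spec_shortenlongruns; infer_instance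

-- ===== CLAIM (what is proved, stated in full; the proofs are below) =====
def Claim_equal_shortenlongruns : Prop := ∀ (L : List Int) (k : Int), Dom_shortenlongruns L k → Pre_shortenlongruns L k → Spec_shortenlongruns L k (shortenlongruns L k)

-- ===== LEMMAS AND PROOFS =====

theorem scan_spec (L : List Int) (i j : Nat) :
    shortenlongrunsScan L i j
      = j + ((L.drop j).takeWhile (fun x => decide (x = L.getD i 0))).length := by
  fun_induction shortenlongrunsScan L i j with
  | case1 j h ih =>
    rw [ih, List.drop_eq_getElem_cons h.1, List.takeWhile_cons_of_pos (by simpa using (List.getD_eq_getElem L 0 h.1 ▸ h.2))]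
    simp; omega
  | case2 j h =>
    rcases Nat.lt_or_ge j L.length with hj | hj
    · rw [List.drop_eq_getElem_cons hj, List.takeWhile_cons_of_neg]
      · simp
      · simp only [decide_eq_true_eq]
        intro hc; exact h ⟨hj, by rw [List.getD_eq_getElem L 0 hj, hc]⟩
    · rw [List.drop_of_length_le hj]; simp

theorem inner_spec (dup : List Int) (first : Int) (fuel : Nat) :
    ∀ (g : Nat), dup.length - g < fuel →
    shortenlongrunsInner fuel dup first (g : Int)
      = ((g + ((dup.drop g).takeWhile (fun x => decide (x = PySem.List.pyGetD dup first 0))).length : Nat) : Int) := by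
  induction fuel with
  | zero => intro g h; omega
  | succ f ih =>
    intro g hg
    rw [shortenlongrunsInner]
    rcases Nat.lt_or_ge g dup.length with hj | hj
    · by_cases hc : PySem.List.pyGetD dup first 0 = dup[g]
      · rw [if_pos]
        · have : ((g : Int) + 1) = ((g + 1 : Nat) : Int) := by push_cast; ring
          rw [this, ih (g+1) (by omega), List.drop_eq_getElem_cons hj,
              List.takeWhile_cons_of_pos (by simp [hc])]
          congr 1; simp; omega
        · constructor
          · simp [PySem.List.len]; omega
          · rw [PySem.List.pyGetD_natCast, List.getD_eq_getElem dup 0 hj]; exact hc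
      · rw [if_neg, List.drop_eq_getElem_cons hj, List.takeWhile_cons_of_neg (by simpa using fun h => hc h.symm)]
        · simp
        · rintro ⟨-, h2⟩
          rw [PySem.List.pyGetD_natCast, List.getD_eq_getElem dup 0 hj] at h2; exact hc h2
    · rw [if_neg, List.drop_of_length_le hj]
      · simp
      · rintro ⟨h1, -⟩; simp [PySem.List.len] at h1; omega

theorem shortenlongruns_main (k : Int) (hk : 1 ≤ k) (f : Nat) :
    ∀ (L out : List Int) (i : Nat), i ≤ L.length → L.length - i < f →
      shortenlongrunsOuter f (out ++ L.drop i) k (out.length) (out.length) (out.length)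
        = shortenlongrunsLoop L k out i := by
  induction f with
  | zero => intro L out i h1 h2; omega
  | succ f ih =>
    intro L out i h1 h2
    by_cases hi : i < L.length
    case neg =>
      have hEq : L.length ≤ i := by omega
      rw [List.drop_of_length_le hEq, List.append_nil, shortenlongrunsOuter,
          if_neg (by simp [PySem.List.len]), shortenlongrunsLoop, dif_neg (by omega)]
    case pos =>
      have hd : L.drop i = L[i] :: L.drop (i+1) := List.drop_eq_getElem_cons hi
      set v := L.getD i 0 with hv
      have hvi : L[i] = v := (List.getD_eq_getElem L 0 hi).symm
      set p : Int → Bool := fun x => decide (x = v) with hp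
      set t := (L.drop i).takeWhile p with htdef
      set m := t.length with hmdef
      have hm1 : 1 ≤ m := by
        rw [hmdef, htdef, hd, List.takeWhile_cons_of_pos (by simp [hp, hvi])]; simp
      have hmle : i + m ≤ L.length := by
        have h3 := List.IsPrefix.length_le (List.takeWhile_prefix (l := L.drop i) p)
        rw [← htdef, ← hmdef] at h3
        simp only [List.length_drop] at h3; omega
      have htrep : t = List.replicate m v := by
        rw [hmdef]; apply List.eq_replicate_of_mem
        intro x hx
        have := List.mem_takeWhile_imp (htdef ▸ hx)
        simpa [hp] using this
      have htake : (L.drop i).take m = t := by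
        rw [hmdef, htdef]
        exact ((List.prefix_iff_eq_take).mp (List.takeWhile_prefix p)).symm
      have hdd : (L.drop i).drop m = L.drop (i + m) := by
        rw [List.drop_drop]
      have hsplit : L.drop i = t ++ L.drop (i + m) := by
        conv_lhs => rw [← List.take_append_drop m (L.drop i)]
        rw [htake, hdd]
      have hget : PySem.List.pyGetD (out ++ L.drop i) (out.length : Int) 0 = v := by
        rw [PySem.List.pyGetD_natCast, List.getD_eq_getElem?_getD,
            List.getElem?_append_right (Nat.le_refl _), hd]
        simp [hvi]
      have hin : shortenlongrunsInner ((out ++ L.drop i).length + 1) (out ++ L.drop i)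
          (out.length) (out.length) = ((out.length + m : Nat) : Int) := by
        rw [inner_spec _ _ _ out.length (by omega)]
        simp only [List.drop_left, hget, ← hp, ← htdef, ← hmdef]
      have hscan : shortenlongrunsScan L i (i+1) = i + m := by
        rw [scan_spec, ← hv, ← hp]
        have hm : m = 1 + ((L.drop (i+1)).takeWhile p).length := by
          rw [hmdef, htdef, hd, List.takeWhile_cons_of_pos (by simp [hp, hvi])]
          simp only [List.length_cons]; omega
        omega
      -- unfold one step of each loop
      rw [shortenlongrunsOuter, if_pos (by simp [PySem.List.len]; omega),
          shortenlongrunsLoop, dif_pos hi]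
      simp only [hin, hscan, ← hv]
      have erunA : ((out.length + m : Nat) : Int) - (out.length : Int) = (m : Int) := by push_cast; ring
      have erunB : ((i + m : Nat) : Int) - (i : Int) = (m : Int) := by push_cast; ring
      rw [erunA, erunB]
      by_cases hbig : (m : Int) > k
      · rw [if_pos hbig, if_pos hbig]
        set idx := PySem.Int.mod (m : Int) k with hidx
        have h0idx : 0 ≤ idx := PySem.Int.mod_nonneg _ (by omega)
        have hidxk : idx < k := PySem.Int.mod_lt _ (by omega)
        have hidxm : idx.toNat ≤ m := by omega
        have hsl1 : PySem.List.slice (out ++ L.drop i) none (some ((out.length : Int) + idx))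
            = out ++ List.replicate idx.toNat v := by
          rw [PySem.List.slice_to (out ++ L.drop i) (b := (out.length : Int) + idx) (by omega)]
          have e1 : ((out.length : Int) + idx).toNat = out.length + idx.toNat := by omega
          rw [e1, List.take_length_add_append]
          congr 1
          rw [hsplit, List.take_append_of_le_length (by rw [htrep]; simp [hidxm]),
              htrep, List.take_replicate]
          congr 1; omega
        have hsl2 : PySem.List.slice (out ++ L.drop i) (some ((out.length + m : Nat) : Int)) none
            = L.drop (i + m) := by
          rw [PySem.List.slice_from (out ++ L.drop i) (a := ((out.length + m : Nat) : Int)) (by positivity)]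
          rw [Int.toNat_natCast, List.drop_length_add_append, hdd]
        rw [hsl1, hsl2]
        have efirst : (out.length : Int) + idx = (((out ++ List.replicate idx.toNat v).length : Nat) : Int) := by
          simp; omega
        rw [efirst]
        exact ih L (out ++ List.replicate idx.toNat v) (i + m) (by omega) (by omega)
      · rw [if_neg hbig, if_neg hbig]
        by_cases heq : (m : Int) = k
        · rw [if_pos heq, if_pos heq]
          have hsl1 : PySem.List.slice (out ++ L.drop i) none (some (((out.length + m : Nat) : Int) - 1))
              = out ++ List.replicate (m - 1) v := by
            rw [PySem.List.slice_to (out ++ L.drop i) (b := ((out.length + m : Nat) : Int) - 1) (by push_cast; omega)]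
            have e1 : (((out.length + m : Nat) : Int) - 1).toNat = out.length + (m - 1) := by omega
            rw [e1, List.take_length_add_append]
            congr 1
            rw [hsplit, List.take_append_of_le_length (by rw [htrep]; simp),
                htrep, List.take_replicate]
            congr 1; omega
          have hsl2 : PySem.List.slice (out ++ L.drop i) (some ((out.length + m : Nat) : Int)) none
              = L.drop (i + m) := by
            rw [PySem.List.slice_from (out ++ L.drop i) (a := ((out.length + m : Nat) : Int)) (by positivity)]
            rw [Int.toNat_natCast, List.drop_length_add_append, hdd]
          rw [hsl1, hsl2]
          have efirst : ((out.length + m : Nat) : Int) - 1 = (((out ++ List.replicate (m - 1) v).length : Nat) : Int) := by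
            simp; omega
          have erep : ((m : Int) - 1).toNat = m - 1 := by omega
          rw [efirst, erep]
          exact ih L (out ++ List.replicate (m - 1) v) (i + m) (by omega) (by omega)
        · rw [if_neg heq, if_neg heq]
          have hdup : out ++ L.drop i = (out ++ List.replicate m v) ++ L.drop (i + m) := by
            rw [hsplit, htrep, List.append_assoc]
          have efirst : ((out.length + m : Nat) : Int) = (((out ++ List.replicate m v).length : Nat) : Int) := by
            simp
          have erep : (m : Int).toNat = m := by omega
          rw [hdup, efirst, erep]
          exact ih L (out ++ List.replicate m v) (i + m) (by omega) (by omega)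

-- ===== VERDICT (by name: the statement is the Claim_ definition above) =====
theorem shortenlongruns_spec : Claim_equal_shortenlongruns := by
  intro L k _ hpre
  unfold Spec_shortenlongruns shortenlongruns shortenlongruns_alt
  rcases hpre with h | hk
  · subst h; simp [shortenlongrunsOuter, shortenlongrunsLoop, PySem.List.len]
  · simpa using shortenlongruns_main k hk (L.length + 1) L [] 0 (by omega) (by omega)
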